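-- pv_equiv track=rewrite | github.com/boenomarcus/gedi_iffsc | utils/gediTasks.py | gs_match_files
-- ===== SOURCE A (Python) =====
-- def gs_match_files(files, versions):
--     """
--     > gs_match_files(files, versions)
--         Function to get dictionary of matching L1B, L2A and L2B Granules.
--
--     > Arguments:
--         - files: list of GEDI filenames;
--         - versions: list of GEDI Versions.
--
--     > Output:
--         - Dictionary of matching granules by version.
--     """
--
--     # Create empty dictionary to store results
--     gedi_dict = {}
--
--     # iterate through versions
--     for version in versions:
--
--         # Create nested dictionary for version
--         gedi_dict[version] = {}
--
--         # Get files for version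
--         version_files = [f for f in files if f.endswith(version + ".h5")]
--
--         # Get L1B files for version
--         l1b_files = [
--             f for f in version_files if f.startswith("processed_GEDI01_B")
--             ]
--
--         # Iterate through L1B files
--         for l1b_file in l1b_files:
--
--             # Get match parameter
--             str2match = l1b_file[19:46]
--
--             # Get matching L2A and L2B files
--             matched_files = [f for f in files if f[19:46] == str2match]
--
--             # Append files to dictionary
--             gedi_dict[version][str2match] = matched_files
--
--     # Return results
--     return gedi_dict
-- ===== SOURCE B (Python) =====
-- def gs_match_files(files, versions):
--     """Index-based re-implementation: one pass builds a key->files table and a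
--     flat (version, key) worklist; the result is assembled from the table."""
--
--     # Global key -> matching files table (single pass over files)
--     index = {}
--     for f in files:
--         index.setdefault(f[19:46], []).append(f)
--
--     # Flat worklist: which version owns which L1B key (one pass over files)
--     pairs = []
--     for f in files:
--         if f.startswith("processed_GEDI01_B"):
--             for version in versions:
--                 if f.endswith(version + ".h5"):
--                     pairs.append((version, f[19:46]))
--
--     # Assemble: every version gets a dict, filled from the table
--     gedi_dict = {version: {} for version in versions}
--     for version, key in pairs:
--         gedi_dict[version][key] = index[key]
--     return gedi_dict
-- ===== Notes on version B (the rewrite author's own statement) =====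
-- stated objective: faster
-- what changed: Replaces the nested versions x L1B-files x files rescanning (each L1B key re-filters the whole file list, per version) by single passes: one pass builds a global key->files index, one pass collects a flat (version, key) worklist, and the result is assembled from the index.
import Mathlib
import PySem

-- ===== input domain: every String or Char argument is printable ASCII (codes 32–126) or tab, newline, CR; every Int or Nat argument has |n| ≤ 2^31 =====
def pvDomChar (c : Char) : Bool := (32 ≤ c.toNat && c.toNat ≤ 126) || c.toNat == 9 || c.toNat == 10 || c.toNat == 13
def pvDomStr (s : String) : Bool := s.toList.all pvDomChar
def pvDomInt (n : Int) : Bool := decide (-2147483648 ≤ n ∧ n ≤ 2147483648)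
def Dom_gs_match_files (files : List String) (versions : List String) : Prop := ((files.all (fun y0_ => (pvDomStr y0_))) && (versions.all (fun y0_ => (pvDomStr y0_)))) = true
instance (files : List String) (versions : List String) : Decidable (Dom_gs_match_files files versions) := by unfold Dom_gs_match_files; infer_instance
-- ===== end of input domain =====

-- B replaces A's nested version×L1B×files rescanning by one-pass index/worklist building; measured faster (asymptotic).

-- ===== PORT A =====
def gs_match_files (files : List String) (versions : List String) : List (String × List (String × List String)) :=
  let gedi_dict : PySem.Dict String (PySem.Dict String (List String)) :=
    versions.foldl (fun gedi_dict version =>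
      -- gedi_dict[version] = {}
      let gedi_dict := gedi_dict.insert version PySem.Dict.empty
      let version_files := files.filter (fun f => PySem.Str.endswith f (version ++ ".h5"))
      let l1b_files := version_files.filter (fun f => PySem.Str.startswith f "processed_GEDI01_B")
      l1b_files.foldl (fun gd l1b_file =>
        let str2match := PySem.Str.slice l1b_file (some 19) (some 46)
        let matched_files := files.filter (fun f => PySem.Str.slice f (some 19) (some 46) == str2match)
        -- gedi_dict[version][str2match] = matched_files  (version is always a key of gd here,
        -- so Python's lookup never raises; modify with a default is exact on reachable states)
        gd.modify version PySem.Dict.empty (fun inner => inner.insert str2match matched_files)) gedi_dict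
    ) PySem.Dict.empty
  gedi_dict.items.map (fun p => (p.1, p.2.items))

-- ===== PORT B =====
def gs_match_files_alt (files : List String) (versions : List String) : List (String × List (String × List String)) :=
  -- index.setdefault(f[19:46], []).append(f)
  let index : PySem.Dict String (List String) :=
    files.foldl (fun d f => d.modify (PySem.Str.slice f (some 19) (some 46)) [] (fun xs => xs ++ [f]))
      PySem.Dict.empty
  -- flat (version, key) worklist
  let pairs : List (String × String) :=
    files.foldl (fun ps f =>
      if PySem.Str.startswith f "processed_GEDI01_B" then
        versions.foldl (fun ps version =>
          if PySem.Str.endswith f (version ++ ".h5") then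
            ps ++ [(version, PySem.Str.slice f (some 19) (some 46))]
          else ps) ps
      else ps) []
  -- gedi_dict = {version: {} for version in versions}
  let gedi_dict0 : PySem.Dict String (PySem.Dict String (List String)) :=
    versions.foldl (fun d version => d.insert version PySem.Dict.empty) PySem.Dict.empty
  -- gedi_dict[version][key] = index[key]  (version and key are always present, so Python's
  -- lookups never raise; modify/getD with defaults are exact on reachable states)
  let gedi_dict :=
    pairs.foldl (fun d p =>
      d.modify p.1 PySem.Dict.empty (fun inner => inner.insert p.2 (index.getD p.2 []))) gedi_dict0
  gedi_dict.items.map (fun p => (p.1, p.2.items))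

-- ===== PRECONDITION & SPEC =====
def Spec_gs_match_files (files : List String) (versions : List String) (out : List (String × List (String × List String))) : Prop := out = gs_match_files_alt files versions
instance (files : List String) (versions : List String) (out : List (String × List (String × List String))) : Decidable (Spec_gs_match_files files versions out) := by unfold Spec_gs_match_files; infer_instance

-- ===== CLAIM (what is proved, stated in full; the proofs are below) =====
def Claim_equal_gs_match_files : Prop := ∀ (files : List String) (versions : List String), Dom_gs_match_files files versions → Spec_gs_match_files files versions (gs_match_files files versions)

-- ===== LEMMAS AND PROOFS =====

-- proof-side names for the expressions both ports share
def pvk (f : String) : String := PySem.Str.slice f (some 19) (some 46)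
def pvStarts (f : String) : Bool := PySem.Str.startswith f "processed_GEDI01_B"
def pvEnds (f v : String) : Bool := PySem.Str.endswith f (v ++ ".h5")
def pvMatched (files : List String) (k : String) : List String :=
  files.filter (fun g => pvk g == k)
-- the inner dict A builds for one version
def pvInnerA (files : List String) (v : String) : PySem.Dict String (List String) :=
  ((((files.filter (fun f => pvEnds f v)).filter (fun f => pvStarts f)).map (fun f => pvk f))).foldl
    (fun inn k => inn.insert k (pvMatched files k)) PySem.Dict.empty
-- B's worklist in flatMap form
def pvPairs (files versions : List String) : List (String × String) :=
  files.flatMap (fun f =>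
    if pvStarts f then (versions.filter (fun v => pvEnds f v)).map (fun v => (v, pvk f)) else [])

-- A's inner loop only modifies the freshly inserted key
theorem pv_modify_fold_insert {α ν : Type} (l : List α) (t : α → ν → ν)
    (d : PySem.Dict String ν) (k : String) (dflt : ν) (w : ν) :
    l.foldl (fun gd x => PySem.Dict.modify gd k dflt (t x)) (d.insert k w)
      = d.insert k (l.foldl (fun inn x => t x inn) w) := by
  induction l generalizing w with
  | nil => rfl
  | cons x l ih =>
    simp only [List.foldl_cons]
    rw [show PySem.Dict.modify (d.insert k w) k dflt (t x) = d.insert k (t x w) by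
      simp [PySem.Dict.modify, PySem.Dict.getD_insert_self, PySem.Dict.insert_insert_self]]
    exact ih (t x w)

-- A in insert-normal form
theorem pv_A_eq (files versions : List String) :
    gs_match_files files versions
      = (versions.foldl (fun gd v => gd.insert v (pvInnerA files v)) PySem.Dict.empty).items.map
          (fun p => (p.1, p.2.items)) := by
  unfold gs_match_files pvInnerA
  simp only [pv_modify_fold_insert, List.foldl_map, pvMatched, pvk, pvEnds, pvStarts]

-- B's index table looks up to exactly A's matched_files list
theorem pv_index_getD (files : List String) (k : String) :
    (files.foldl (fun d f => d.modify (PySem.Str.slice f (some 19) (some 46)) [] (fun xs => xs ++ [f]))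
        PySem.Dict.empty).getD k []
      = pvMatched files k := by
  have h : files.foldl (fun d f => d.modify (PySem.Str.slice f (some 19) (some 46)) [] (fun xs => xs ++ [f])) PySem.Dict.empty
      = (files.map (fun f => (pvk f, f))).foldl (fun d p => d.modify p.1 [] (fun xs => xs ++ [p.2])) PySem.Dict.empty := by
    rw [List.foldl_map]; rfl
  rw [h, PySem.Dict.getD_foldl_modify_append]
  simp [pvMatched, List.filter_map, Function.comp_def]

-- B's worklist loop builds pvPairs
theorem pv_pairs_eq (files versions : List String) :
    files.foldl (fun ps f =>
      if PySem.Str.startswith f "processed_GEDI01_B" then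
        versions.foldl (fun ps version =>
          if PySem.Str.endswith f (version ++ ".h5") then
            ps ++ [(version, PySem.Str.slice f (some 19) (some 46))]
          else ps) ps
      else ps) []
    = pvPairs files versions := by
  unfold pvPairs
  have h : ∀ (acc : List (String × String)), files.foldl (fun ps f =>
      if pvStarts f then
        versions.foldl (fun ps version =>
          if pvEnds f version then ps ++ [(version, pvk f)] else ps) ps
      else ps) acc = acc ++ files.flatMap (fun f =>
        if pvStarts f then (versions.filter (fun v => pvEnds f v)).map (fun v => (v, pvk f)) else []) := by
    intro acc
    rw [show (fun (ps : List (String × String)) f =>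
      if pvStarts f then
        versions.foldl (fun ps version =>
          if pvEnds f version then ps ++ [(version, pvk f)] else ps) ps
      else ps) = (fun ps f => ps ++ (if pvStarts f then (versions.filter (fun v => pvEnds f v)).map (fun v => (v, pvk f)) else [])) from ?_]
    · exact PySem.List.foldl_append_eq_flatMap _ _ _
    · funext ps f
      by_cases h : pvStarts f
      · simp only [h, if_true]
        exact PySem.List.foldl_append_if (fun v => pvEnds f v) (fun v => (v, pvk f)) versions ps
      · simp [h]
  exact h []

-- modify on a present key of a dup-free dict is a pointwise items map
theorem pv_modify_items {ν : Type} (d : PySem.Dict String ν) (k : String) (dflt : ν) (g : ν → ν)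
    (hnd : d.keys.Nodup) (hc : d.contains k = true) :
    (PySem.Dict.modify d k dflt g).items
      = d.items.map (fun q => if q.1 = k then (q.1, g q.2) else q) := by
  simp only [PySem.Dict.modify, PySem.Dict.insert, hc, if_true]
  apply List.map_congr_left
  intro q hq
  by_cases h : q.1 = k
  · have : d.getD k dflt = q.2 :=
      PySem.Dict.getD_of_mem_items d (show (k, q.2) ∈ d.items by rw [← h]; exact hq) hnd dflt
    simp [h, this]
  · simp [h]

theorem pv_modify_keys {ν : Type} (d : PySem.Dict String ν) (k : String) (dflt : ν) (g : ν → ν)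
    (hnd : d.keys.Nodup) (hc : d.contains k = true) :
    (PySem.Dict.modify d k dflt g).keys = d.keys := by
  have h := pv_modify_items d k dflt g hnd hc
  show (PySem.Dict.modify d k dflt g).items.map Prod.fst = d.items.map Prod.fst
  rw [h, List.map_map]
  apply List.map_congr_left
  intro q _
  by_cases h : q.1 = k <;> simp [h]

-- the fill loop, per existing outer key
theorem pv_fill {ν : Type} (P : List (String × String)) (g : String → ν → ν) (dflt : ν) :
    ∀ (d : PySem.Dict String ν), d.keys.Nodup → (∀ p ∈ P, d.contains p.1 = true) →
    (P.foldl (fun d p => PySem.Dict.modify d p.1 dflt (g p.2)) d).items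
      = d.items.map (fun q =>
          (q.1, (P.filterMap (fun p => if p.1 = q.1 then some p.2 else none)).foldl
                  (fun w x => g x w) q.2)) := by
  induction P with
  | nil =>
    intro d _ _
    simp
  | cons p P ih =>
    intro d hnd hcon
    have hc : d.contains p.1 = true := hcon p (by simp)
    have hk : (PySem.Dict.modify d p.1 dflt (g p.2)).keys = d.keys := pv_modify_keys d p.1 dflt _ hnd hc
    simp only [List.foldl_cons]
    rw [ih (PySem.Dict.modify d p.1 dflt (g p.2)) (by rw [hk]; exact hnd)
      (by intro q hq
          rw [PySem.Dict.contains_iff_mem_keys, hk, ← PySem.Dict.contains_iff_mem_keys]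
          exact hcon q (by simp [hq]))]
    rw [pv_modify_items d p.1 dflt _ hnd hc, List.map_map]
    apply List.map_congr_left
    intro q _
    by_cases h : p.1 = q.1
    · simp [h]
    · have h' : ¬ q.1 = p.1 := fun hh => h hh.symm
      simp [h, h']

-- every value of the init dict is empty
theorem pv_vals {ν : Type} (l : List String) (e : ν) :
    ∀ q ∈ (l.foldl (fun d v => d.insert v e) PySem.Dict.empty).items, q.2 = e := by
  have h : ∀ (d : PySem.Dict String ν), (∀ q ∈ d.items, q.2 = e) →
      ∀ q ∈ (l.foldl (fun d v => d.insert v e) d).items, q.2 = e := by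
    induction l with
    | nil => intro d hd; exact hd
    | cons v l ih =>
      intro d hd
      simp only [List.foldl_cons]
      apply ih
      intro q hq
      rcases (PySem.Dict.mem_items_insert d v e q).1 hq with h | h
      · rw [h]
      · exact hd q h.1
  exact h PySem.Dict.empty (by simp [PySem.Dict.empty])

-- a fold of inserts whose value depends only on the key, vs the constant-value fold
theorem pv_gfold {ν ν' : Type} (l : List String) (F : String → ν) (e : ν') :
    ∀ (d : PySem.Dict String ν) (d0 : PySem.Dict String ν'),
    d.items = d0.items.map (fun q => (q.1, F q.1)) →
    (l.foldl (fun gd v => gd.insert v (F v)) d).items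
      = (l.foldl (fun gd v => gd.insert v e) d0).items.map (fun q => (q.1, F q.1)) := by
  induction l with
  | nil => intro d d0 h; exact h
  | cons v l ih =>
    intro d d0 h
    simp only [List.foldl_cons]
    apply ih
    have hcon : d.contains v = d0.contains v := by
      simp only [PySem.Dict.contains, h, List.any_map]
      rfl
    simp only [PySem.Dict.insert, hcon]
    by_cases hc : d0.contains v = true
    · simp only [hc, if_true, h, List.map_map]
      apply List.map_congr_left
      intro q _
      by_cases hq : q.1 = v <;> simp [hq]
    · rw [Bool.not_eq_true] at hc
      simp [hc, h]

-- inserting the same key/value c ≥ 1 times is inserting it once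
theorem pv_repl {ν : Type} (V : String → ν) (c : Nat) (hc : 1 ≤ c) (k : String)
    (d : PySem.Dict String ν) :
    (List.replicate c k).foldl (fun inn k => inn.insert k (V k)) d = d.insert k (V k) := by
  induction c generalizing d with
  | zero => omega
  | succ c ih =>
    simp only [List.replicate_succ, List.foldl_cons]
    rcases Nat.eq_zero_or_pos c with h | h
    · simp [h]
    · rw [ih h, PySem.Dict.insert_insert_self]

theorem pv_filterMap_eq_replicate {γ : Type} (l : List String) (v : String) (c : γ) :
    l.filterMap (fun x => if x = v then some c else none) = List.replicate (l.count v) c := by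
  induction l with
  | nil => simp
  | cons x l ih =>
    by_cases h : x = v
    · simp [h, ih, List.replicate_succ]
    · simp [h, ih]

-- extracting one version's keys from the worklist
theorem pv_keysFor (files versions : List String) (v : String) :
    (pvPairs files versions).filterMap (fun p => if p.1 = v then some p.2 else none)
    = files.flatMap (fun f =>
        if pvStarts f then
          (if pvEnds f v then List.replicate (versions.count v) (pvk f) else [])
        else []) := by
  unfold pvPairs
  rw [List.filterMap_flatMap]
  apply List.flatMap_congr
  intro f _
  by_cases hs : pvStarts f
  · simp only [hs, if_true, List.filterMap_map]
    rw [show ((fun p : String × String => if p.1 = v then some p.2 else none) ∘ fun v' => (v', pvk f))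
        = fun x => if x = v then some (pvk f) else none from rfl]
    rw [pv_filterMap_eq_replicate]
    by_cases he : pvEnds f v
    · rw [List.count_filter (by simpa using he), if_pos he]
    · rw [if_neg he]
      have : (versions.filter (fun v' => pvEnds f v')).count v = 0 := by
        rw [List.count_eq_zero]
        intro hmem
        exact he (by simpa using (List.mem_filter.1 hmem).2)
      simp [this]
  · simp [hs]

-- the per-version inner dicts agree (v must actually occur in versions)
theorem pv_inner_eq (files versions : List String) (v : String) (hv : v ∈ versions) :
    (files.flatMap (fun f =>
        if pvStarts f then
          (if pvEnds f v then List.replicate (versions.count v) (pvk f) else [])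
        else [])).foldl (fun inn k => inn.insert k (pvMatched files k)) PySem.Dict.empty
    = pvInnerA files v := by
  unfold pvInnerA
  have hc : 1 ≤ versions.count v := List.count_pos_iff.2 hv
  have gen : ∀ (fl : List String) (d : PySem.Dict String (List String)),
      (fl.flatMap (fun f =>
        if pvStarts f then
          (if pvEnds f v then List.replicate (versions.count v) (pvk f) else [])
        else [])).foldl (fun inn k => inn.insert k (pvMatched files k)) d
      = ((((fl.filter (fun f => pvEnds f v)).filter (fun f => pvStarts f)).map (fun f => pvk f))).foldl
          (fun inn k => inn.insert k (pvMatched files k)) d := by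
    intro fl
    induction fl with
    | nil => intro d; rfl
    | cons f fl ih =>
      intro d
      by_cases hs : pvStarts f <;> by_cases he : pvEnds f v <;>
        simp only [List.flatMap_cons, List.filter_cons, hs, he, if_true,
          List.foldl_append, List.map_cons, List.foldl_cons]
      · rw [pv_repl _ _ hc, ih]
      · simp [ih]
      · simp [ih]
      · simp [ih]
  exact gen files PySem.Dict.empty

-- B in insert-normal form
theorem pv_B_eq (files versions : List String) :
    gs_match_files_alt files versions
      = (versions.foldl (fun gd v => gd.insert v (pvInnerA files v)) PySem.Dict.empty).items.map
          (fun p => (p.1, p.2.items)) := by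
  unfold gs_match_files_alt
  simp only [pv_pairs_eq, pv_index_getD]
  set init : PySem.Dict String (PySem.Dict String (List String)) :=
    versions.foldl (fun d version => d.insert version PySem.Dict.empty) PySem.Dict.empty with hinit
  have hnd : init.keys.Nodup := by
    rw [hinit]
    exact PySem.Dict.nodup_keys_foldl_insert versions (fun _ _ => PySem.Dict.empty)
      PySem.Dict.empty (by simp [PySem.Dict.empty, PySem.Dict.keys])
  have hkeys : init.keys = PySem.Set.ofList versions := by
    rw [hinit, PySem.Dict.keys_foldl_insert]
    rw [show (PySem.Dict.empty : PySem.Dict String (PySem.Dict String (List String))).keys = [] from rfl]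
    exact PySem.Set.update_nil_left versions
  have hmemv : ∀ p ∈ pvPairs files versions, p.1 ∈ versions := by
    intro p hp
    rcases List.mem_flatMap.1 hp with ⟨f, _, hpf⟩
    by_cases hs : pvStarts f
    · rw [if_pos hs] at hpf
      rcases List.mem_map.1 hpf with ⟨v', hv', rfl⟩
      exact (List.mem_filter.1 hv').1
    · rw [if_neg hs] at hpf
      exact absurd hpf (List.not_mem_nil)
  have hcon : ∀ p ∈ pvPairs files versions, init.contains p.1 = true := by
    intro p hp
    rw [PySem.Dict.contains_iff_mem_keys, hkeys, PySem.Set.mem_ofList]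
    exact hmemv p hp
  have hfill := pv_fill (pvPairs files versions)
    (fun x w => w.insert x (pvMatched files x)) PySem.Dict.empty init hnd hcon
  beta_reduce at hfill
  rw [hfill]
  have hA := pv_gfold versions (pvInnerA files) (PySem.Dict.empty : PySem.Dict String (List String))
    PySem.Dict.empty PySem.Dict.empty (by rfl)
  rw [hA]
  rw [show List.foldl (fun (gd : PySem.Dict String (PySem.Dict String (List String))) v => gd.insert v PySem.Dict.empty) PySem.Dict.empty versions = init from hinit.symm]
  rw [List.map_map, List.map_map]
  apply List.map_congr_left
  intro q hq
  have hq2 : q.2 = PySem.Dict.empty := pv_vals versions PySem.Dict.empty q (by rw [hinit] at hq; exact hq)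
  have hq1 : q.1 ∈ versions := by
    have : q.1 ∈ init.keys := by
      show q.1 ∈ init.items.map Prod.fst
      exact List.mem_map.2 ⟨q, hq, rfl⟩
    rw [hkeys, PySem.Set.mem_ofList] at this
    exact this
  simp only [Function.comp_def]
  rw [pv_keysFor, hq2, pv_inner_eq files versions q.1 hq1]

-- ===== VERDICT (by name: the statement is the Claim_ definition above) =====
theorem gs_match_files_spec : Claim_equal_gs_match_files := by
  intro files versions _
  show gs_match_files files versions = gs_match_files_alt files versions
  rw [pv_A_eq, pv_B_eq]
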